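-- pv_equiv track=rewrite | github.com/UWPCE-PythonCert-ClassRepos/SP_Online_PY210 | students/duanez2021/lesson02/gridPrinter_part2.py | print_vRow
-- ===== SOURCE A (Python) =====
-- def print_vRow(n):
--     vLine = '|'
--     vRow = ''
--     if n < 3: n = 3
--
--     i = 1
--     dash = n//2
--     for j in range(3):
--         vRow = vRow + vLine
--         i = i + 1
--         if i <= 3:
--             for y in range(dash):
--                 vRow = vRow + ' '
--     return vRow
-- ===== SOURCE B (Python) =====
-- def print_vRow(n):
--     if n < 3:
--         n = 3
--     dash = n // 2
--     return '|' + ' ' * dash + '|' + ' ' * dash + '|'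
-- ===== Notes on version B (the rewrite author's own statement) =====
-- stated objective: simpler
-- what changed: Replaces the unrolled range(3) loop with a per-iteration counter and a nested character-by-character appending loop by a direct closed-form construction '|' + ' '*dash + '|' + ' '*dash + '|'.
import Mathlib
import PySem

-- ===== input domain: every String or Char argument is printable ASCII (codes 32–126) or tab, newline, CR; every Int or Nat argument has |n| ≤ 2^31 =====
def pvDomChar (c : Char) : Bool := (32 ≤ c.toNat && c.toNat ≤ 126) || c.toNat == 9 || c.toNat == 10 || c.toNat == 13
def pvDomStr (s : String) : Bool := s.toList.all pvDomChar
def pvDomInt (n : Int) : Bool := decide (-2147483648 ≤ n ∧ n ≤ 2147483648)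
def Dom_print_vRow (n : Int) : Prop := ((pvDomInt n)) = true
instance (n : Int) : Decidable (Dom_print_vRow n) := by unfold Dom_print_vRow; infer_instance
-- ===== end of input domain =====

-- B replaces A's unrolled counter loop with a closed-form string construction (objective: simpler).

-- ===== PORT A =====
-- strings are built as List Char and wrapped with String.mk at the end (Lean's String.append is kernel-opaque); exact character for character
def print_vRow (n : Int) : String :=
  let vLine : List Char := ['|']
  let vRow : List Char := []
  let n := if n < 3 then 3 else n
  let i : Int := 1
  let dash := PySem.Int.floordiv n 2
  let st := (PySem.List.pyRange 0 3 1).foldl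
    (fun (p : List Char × Int) _ =>
      let vRow := p.1 ++ vLine
      let i := p.2 + 1
      let vRow := if i ≤ 3 then
          (PySem.List.pyRange 0 dash 1).foldl (fun s _ => s ++ [' ']) vRow
        else vRow
      (vRow, i)) (vRow, i)
  String.mk st.1

-- ===== PORT B =====
def print_vRow_alt (n : Int) : String :=
  let n := if n < 3 then 3 else n
  let dash := PySem.Int.floordiv n 2
  String.mk (['|'] ++ List.replicate dash.toNat ' ' ++ ['|'] ++ List.replicate dash.toNat ' ' ++ ['|'])

-- ===== PRECONDITION & SPEC =====
def Spec_print_vRow (n : Int) (out : String) : Prop := out = print_vRow_alt n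
instance (n : Int) (out : String) : Decidable (Spec_print_vRow n out) := by unfold Spec_print_vRow; infer_instance

-- ===== CLAIM (what is proved, stated in full; the proofs are below) =====
def Claim_equal_print_vRow : Prop := ∀ (n : Int), Dom_print_vRow n → Spec_print_vRow n (print_vRow n)

-- ===== LEMMAS AND PROOFS =====

-- A's inner loop appends dash spaces: it is the map of the constant ' ' over range(dash)
theorem inner_spaces (d : Int) (s : List Char) :
    (PySem.List.pyRange 0 d 1).foldl (fun s _ => s ++ [' ']) s = s ++ List.replicate d.toNat ' ' := by
  have h := PySem.List.foldl_append_singleton_eq_map (l := PySem.List.pyRange 0 d 1)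
    (f := fun _ => ' ') (acc := s)
  rw [h]
  congr 1
  simp

-- ===== VERDICT (by name: the statement is the Claim_ definition above) =====
theorem print_vRow_spec : Claim_equal_print_vRow := by
  intro n _
  unfold Spec_print_vRow print_vRow print_vRow_alt
  have h3 : PySem.List.pyRange 0 3 1 = [0, 1, 2] := by decide
  simp only [h3, List.foldl_cons, List.foldl_nil]
  simp only [inner_spaces]
  norm_num [List.append_assoc]
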